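-- pv_equiv track=rewrite | github.com/nguyenhuuit/adventofcode | 2015/day3/part2.py | solution
-- ===== SOURCE A (Python) =====
-- def solution(input):
--   s = set()
--   delta = {">":(1,0),"<":(-1,0),"^":(0,1),"v":(0,-1)}
--   xs,ys = 0,0
--   xr,yr = 0,0
--   s.add((xs,ys))
--   s.add((xr,yr))
--   for i in range(len(input)):
--     thay_doi = delta[input[i]]
--     if i % 2 == 1:
--       xs += thay_doi[0]
--       ys += thay_doi[1]
--       s.add((xs,ys))
--     else:
--       xr += thay_doi[0]
--       yr += thay_doi[1]
--       s.add((xr,yr))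
--   return len(s)
-- ===== SOURCE B (Python) =====
-- def solution(input):
--   delta = {">": (1, 0), "<": (-1, 0), "^": (0, 1), "v": (0, -1)}
--
--   def walk(moves):
--     x, y = 0, 0
--     path = []
--     for c in moves:
--       dx, dy = delta[c]
--       x, y = x + dx, y + dy
--       path.append((x, y))
--     return path
--
--   visited = {(0, 0)}
--   visited.update(walk(input[0::2]))
--   visited.update(walk(input[1::2]))
--   return len(visited)
-- ===== Notes on version B (the rewrite author's own statement) =====
-- stated objective: alternative
-- what changed: Replaces A's single index loop that branches on i%2 with two independent passes: the input is split into the even-index (robot) and odd-index (Santa) move streams, each walked separately into a path list, and the visited set is the origin updated with both paths.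
import Mathlib
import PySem

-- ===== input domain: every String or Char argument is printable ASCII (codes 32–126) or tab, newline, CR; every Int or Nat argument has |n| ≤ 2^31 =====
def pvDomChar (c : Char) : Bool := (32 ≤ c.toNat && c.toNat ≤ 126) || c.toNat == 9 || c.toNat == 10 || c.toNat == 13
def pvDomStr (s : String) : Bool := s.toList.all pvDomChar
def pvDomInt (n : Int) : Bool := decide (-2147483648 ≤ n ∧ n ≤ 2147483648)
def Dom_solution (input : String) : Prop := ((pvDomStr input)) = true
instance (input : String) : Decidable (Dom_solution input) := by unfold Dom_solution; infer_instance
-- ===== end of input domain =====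

-- B replaces A's single parity-branched loop over indices by two independent walks over the
-- even-index (robot) and odd-index (Santa) move streams (objective: alternative decomposition).

-- ===== PORT A =====
-- the dict 'delta' (the identical literal dict appears in both A and B; defined once)
def pvDelta : PySem.Dict Char (Int × Int) :=
  PySem.Dict.ofList [('>', ((1:Int), (0:Int))), ('<', (-1, 0)), ('^', (0, 1)), ('v', (0, -1))]

-- A's 'for i in range(len(input))' loop, carrying the index i for the parity branch.
-- delta[input[i]] raises KeyError on a char outside the dict: excluded by Pre_solution
-- (the .getD (0,0) branch is never reached under Pre_solution).
def pvLoopA (l : List Char) (i : Nat) (s : PySem.Set (Int × Int))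
    (santa robot : Int × Int) : PySem.Set (Int × Int) :=
  match l with
  | [] => s
  | c :: rest =>
      let d := (PySem.Dict.get? pvDelta c).getD (0, 0)
      if i % 2 == 1 then
        let santa' := (santa.1 + d.1, santa.2 + d.2)
        pvLoopA rest (i + 1) (PySem.Set.add s santa') santa' robot
      else
        let robot' := (robot.1 + d.1, robot.2 + d.2)
        pvLoopA rest (i + 1) (PySem.Set.add s robot') santa robot'

def solution (input : String) : Int :=
  let s0 := PySem.Set.add (PySem.Set.add (PySem.Set.empty) (((0:Int)), ((0:Int)))) ((0:Int), (0:Int))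
  ((pvLoopA input.toList 0 s0 (0, 0) (0, 0)).length : Int)

-- ===== PORT B =====
-- hand ports of the step-2 slices (PySem.List.slice has no step): pvEvens l = l[0::2], pvOdds l = l[1::2]; exact
mutual
def pvEvens {α : Type} : List α → List α
  | [] => []
  | x :: xs => x :: pvOdds xs
def pvOdds {α : Type} : List α → List α
  | [] => []
  | _ :: xs => pvEvens xs
end

-- B's 'walk': running position, list of visited points (KeyError excluded by Pre_solution, as in A)
def pvWalk (pos : Int × Int) (moves : List Char) : List (Int × Int) :=
  match moves with
  | [] => []
  | c :: rest =>
      let d := (PySem.Dict.get? pvDelta c).getD (0, 0)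
      let p := (pos.1 + d.1, pos.2 + d.2)
      p :: pvWalk p rest

def solution_alt (input : String) : Int :=
  let l := input.toList
  let visited := PySem.Set.ofList [(((0:Int)), ((0:Int)))]
  let visited := PySem.Set.update visited (pvWalk (0, 0) (pvEvens l))
  let visited := PySem.Set.update visited (pvWalk (0, 0) (pvOdds l))
  (visited.length : Int)

-- ===== PRECONDITION & SPEC =====
-- Pre_: every char is one of '><^v'; on any other char the Python A raises KeyError (delta[input[i]]).
def Pre_solution (input : String) : Prop :=
  (input.toList.all fun c => c == '>' || c == '<' || c == '^' || c == 'v') = true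
instance (input : String) : Decidable (Pre_solution input) := by unfold Pre_solution; infer_instance
def pvWitness_solution : String := "^v"

def Spec_solution (input : String) (out : Int) : Prop := out = solution_alt input
instance (input : String) (out : Int) : Decidable (Spec_solution input out) := by unfold Spec_solution; infer_instance

-- ===== CLAIM (what is proved, stated in full; the proofs are below) =====
def Claim_equal_solution : Prop := ∀ (input : String), Dom_solution input → Pre_solution input → Spec_solution input (solution input)

-- ===== LEMMAS AND PROOFS =====

theorem mem_pvLoopA (l : List Char) (i : Nat) (s : PySem.Set (Int × Int))
    (santa robot : Int × Int) (x : Int × Int) :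
    x ∈ pvLoopA l i s santa robot ↔
      x ∈ s ∨ (if i % 2 = 0 then
          x ∈ pvWalk robot (pvEvens l) ∨ x ∈ pvWalk santa (pvOdds l)
        else
          x ∈ pvWalk santa (pvEvens l) ∨ x ∈ pvWalk robot (pvOdds l)) := by
  induction l generalizing i s santa robot with
  | nil => simp [pvLoopA, pvEvens, pvOdds, pvWalk]
  | cons c rest ih =>
    by_cases h : i % 2 = 0
    · have h2 : (i + 1) % 2 = 1 := by omega
      simp [pvLoopA, pvEvens, pvOdds, pvWalk, ih, PySem.Set.mem_add, h, h2]
      tauto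
    · have h' : i % 2 = 1 := by omega
      have h2 : (i + 1) % 2 = 0 := by omega
      simp [pvLoopA, pvEvens, pvOdds, pvWalk, ih, PySem.Set.mem_add, h', h2]
      tauto

theorem nodup_pvLoopA (l : List Char) (i : Nat) (s : PySem.Set (Int × Int))
    (santa robot : Int × Int) (hs : s.Nodup) :
    (pvLoopA l i s santa robot).Nodup := by
  induction l generalizing i s santa robot with
  | nil => exact hs
  | cons c rest ih =>
    simp only [pvLoopA]
    split <;> exact ih _ _ _ _ (PySem.Set.nodup_add _ _ hs)

theorem solution_sets_perm (l : List Char) :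
    List.Perm (pvLoopA l 0
        (PySem.Set.add (PySem.Set.add (PySem.Set.empty) (((0:Int)), ((0:Int)))) ((0:Int), (0:Int)))
        (0, 0) (0, 0))
      (PySem.Set.update
          (PySem.Set.update (PySem.Set.ofList [(((0:Int)), ((0:Int)))]) (pvWalk (0, 0) (pvEvens l)))
          (pvWalk (0, 0) (pvOdds l))) := by
  have hA : (pvLoopA l 0
      (PySem.Set.add (PySem.Set.add (PySem.Set.empty) (((0:Int)), ((0:Int)))) ((0:Int), (0:Int)))
      (0, 0) (0, 0)).Nodup := by
    apply nodup_pvLoopA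
    exact PySem.Set.nodup_add _ _ (PySem.Set.nodup_add _ _ (by simp [PySem.Set.empty]))
  have hB : (PySem.Set.update
      (PySem.Set.update (PySem.Set.ofList [(((0:Int)), ((0:Int)))]) (pvWalk (0, 0) (pvEvens l)))
      (pvWalk (0, 0) (pvOdds l))).Nodup :=
    PySem.Set.nodup_update _ _ (PySem.Set.nodup_update _ _ (PySem.Set.nodup_ofList _))
  rw [List.perm_ext_iff_of_nodup hA hB]
  intro x
  rw [mem_pvLoopA, PySem.Set.mem_update, PySem.Set.mem_update]
  simp only [PySem.Set.mem_add, PySem.Set.mem_ofList, List.mem_singleton, PySem.Set.empty,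
    List.not_mem_nil, Nat.zero_mod, if_true, false_or]
  tauto

-- ===== VERDICT (by name: the statement is the Claim_ definition above) =====
theorem solution_spec : Claim_equal_solution := by
  intro input _ _
  unfold Spec_solution solution solution_alt
  exact congrArg (fun n : Nat => (n : Int)) (solution_sets_perm input.toList).length_eq
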